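-- pv_equiv track=rewrite | github.com/dysangel/glsl-to-ts | util/parse.py | find_assignment_index
-- ===== SOURCE A (Python) =====
-- def find_assignment_index(tokens):
--   in_comment = False
--
--   for i in range(len(tokens)):
--     if tokens[i] == '/':
--       if (i > 0):
--         if tokens[i-1] == '/':
--           in_comment = True
--
--     if tokens[i] == '\n':
--       in_comment = False
--
--     if not in_comment and tokens[i] == '=':
--       if i > 0 and tokens[i-1] == '=':
--         continue
--       if (i + 1) < len(tokens) and tokens[i+1] == '=':
--         continue
--       return i
--   return -1
-- ===== SOURCE B (Python) =====
-- def find_assignment_index(tokens):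
--   # pass 1: per-index comment mask (same '//'-starts / '\n'-ends state machine)
--   mask = []
--   in_comment = False
--   prev = None
--   for t in tokens:
--     if prev == '/' and t == '/':
--       in_comment = True
--     if t == '\n':
--       in_comment = False
--     mask.append(in_comment)
--     prev = t
--   # pass 2: first '=' outside a comment and not part of '=='
--   prev = None
--   for i, (t, m, nxt) in enumerate(zip(tokens, mask, tokens[1:] + [None])):
--     if t == '=' and not m and prev != '=' and nxt != '=':
--       return i
--     prev = t
--   return -1
-- ===== Notes on version B (the rewrite author's own statement) =====
-- stated objective: alternative
-- what changed: A's single fused scan is split into two passes: first build a per-index in-comment mask with the '//'-starts/newline-ends state machine, then scan the tokens zipped with the mask and a lookahead list for the first '=' that is outside a comment and not part of '=='.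
import Mathlib
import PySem

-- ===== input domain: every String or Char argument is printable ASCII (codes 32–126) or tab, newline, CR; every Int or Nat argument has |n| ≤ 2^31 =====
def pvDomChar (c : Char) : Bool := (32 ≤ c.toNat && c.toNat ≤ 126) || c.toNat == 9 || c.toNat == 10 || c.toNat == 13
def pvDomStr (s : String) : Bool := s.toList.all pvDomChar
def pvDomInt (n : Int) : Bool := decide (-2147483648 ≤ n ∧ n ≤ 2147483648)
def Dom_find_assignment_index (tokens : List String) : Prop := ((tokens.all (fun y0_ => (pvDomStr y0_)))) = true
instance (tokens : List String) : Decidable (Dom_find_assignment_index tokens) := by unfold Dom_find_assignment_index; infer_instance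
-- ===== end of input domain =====

-- B replaces A's fused scan by two passes (build a per-index comment mask, then scan for
-- the first eligible '='); objective: alternative decomposition, same cost.

-- ===== PORT A =====
-- A's single loop; prev carries tokens[i-1] (none at i = 0), rest.head? is tokens[i+1].
def pvLoopA : List String → Option String → Nat → Bool → Int
  | [], _, _, _ => -1
  | t :: rest, prev, i, inc =>
    let inc1 := if t = "/" ∧ prev = some "/" then true else inc
    let inc2 := if t = "\n" then false else inc1
    if inc2 = false ∧ t = "=" then
      if prev = some "=" then pvLoopA rest (some t) (i + 1) inc2
      else if rest.head? = some "=" then pvLoopA rest (some t) (i + 1) inc2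
      else (i : Int)
    else pvLoopA rest (some t) (i + 1) inc2

def find_assignment_index (tokens : List String) : Int :=
  pvLoopA tokens none 0 false

-- ===== PORT B =====
-- pass 1 of Source B: the per-index comment mask
def pvMaskB : List String → Option String → Bool → List Bool
  | [], _, _ => []
  | t :: rest, prev, inc =>
    let inc1 := if prev = some "/" ∧ t = "/" then true else inc
    let inc2 := if t = "\n" then false else inc1
    inc2 :: pvMaskB rest (some t) inc2

-- pass 2 of Source B: scan the zipped (token, mask, lookahead) triples
def pvScanB : List (String × Bool × Option String) → Option String → Nat → Int
  | [], _, _ => -1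
  | (t, m, nxt) :: rest, prev, i =>
    if t = "=" ∧ m = false ∧ prev ≠ some "=" ∧ nxt ≠ some "=" then (i : Int)
    else pvScanB rest (some t) (i + 1)

def find_assignment_index_alt (tokens : List String) : Int :=
  let mask := pvMaskB tokens none false
  let nxts := (tokens.drop 1).map some ++ [none]
  pvScanB (tokens.zip (mask.zip nxts)) none 0

-- ===== PRECONDITION & SPEC =====
def Spec_find_assignment_index (tokens : List String) (out : Int) : Prop := out = find_assignment_index_alt tokens
instance (tokens : List String) (out : Int) : Decidable (Spec_find_assignment_index tokens out) := by unfold Spec_find_assignment_index; infer_instance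

-- ===== CLAIM (what is proved, stated in full; the proofs are below) =====
def Claim_equal_find_assignment_index : Prop := ∀ (tokens : List String), Dom_find_assignment_index tokens → Spec_find_assignment_index tokens (find_assignment_index tokens)

-- ===== LEMMAS AND PROOFS =====
lemma pv_zip_step (t : String) (rest : List String) (prev : Option String) (inc : Bool) :
    (t :: rest).zip ((pvMaskB (t :: rest) prev inc).zip (((t :: rest).drop 1).map some ++ [none]))
      = (t, (if t = "\n" then false else if prev = some "/" ∧ t = "/" then true else inc), rest.head?)
        :: rest.zip ((pvMaskB rest (some t) (if t = "\n" then false else if prev = some "/" ∧ t = "/" then true else inc)).zip ((rest.drop 1).map some ++ [none])) := by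
  cases rest <;> simp [pvMaskB, List.zip]

lemma pv_main : ∀ (rest : List String) (prev : Option String) (i : Nat) (inc : Bool),
    pvScanB (rest.zip ((pvMaskB rest prev inc).zip ((rest.drop 1).map some ++ [none]))) prev i
      = pvLoopA rest prev i inc := by
  intro rest
  induction rest with
  | nil => intro prev i inc; rfl
  | cons t rest ih =>
    intro prev i inc
    rw [pv_zip_step]
    simp only [pvScanB, pvLoopA, ih]
    split_ifs <;> simp_all

-- ===== VERDICT (by name: the statement is the Claim_ definition above) =====
theorem find_assignment_index_spec : Claim_equal_find_assignment_index := by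
  intro tokens _
  unfold Spec_find_assignment_index find_assignment_index find_assignment_index_alt
  exact (pv_main tokens none 0 false).symm
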